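-- pv_equiv track=rewrite | github.com/ko1keith/coding_probs | Shift2DGrid/shift_2d_grid.py | shift_2D_grid
-- ===== SOURCE A (Python) =====
-- def shift_2D_grid(grid, k):
--     if k == 0:
--         return grid
--
--     flat_grid = []
--     m = len(grid)
--     n = len(grid[0])
--     # flatten grid
--     for i in grid:
--         for j in i:
--             flat_grid.append(j)
--
--     #shift each element in flat grid by k times
--     new_flat = []
--     for l in range(k):
--         temp_flat = list(new_flat)
--         for i in range(len(flat_grid)):
--             if i == 0:
--                 if l == 0:
--                     new_flat.insert(i, flat_grid[len(flat_grid) - 1])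
--                 else:
--                     new_flat[i] = temp_flat[len(temp_flat) - 1]
--             else:
--                 if l == 0:
--                     new_flat.insert(i, flat_grid[i - 1])
--                 else:
--                     new_flat[i] = temp_flat[i - 1]
--
--     #unflatten flat_grid
--     new_grid = []
--     for i in range(m):
--         temp_list = new_flat[(i*n): ((i*n) + n)]
--         new_grid.append(temp_list)
--
--     return new_grid
-- ===== SOURCE B (Python) =====
-- def shift_2D_grid(grid, k):
--     if k == 0:
--         return grid
--     m, n = len(grid), len(grid[0])
--     flat = [x for row in grid for x in row]
--     t = len(flat)
--     if t:
--         s = k % t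
--         flat = flat[t - s:] + flat[:t - s]
--     return [flat[r * n: r * n + n] for r in range(m)]
-- ===== Notes on version B (the rewrite author's own statement) =====
-- stated objective: faster
-- what changed: A shifts the flattened grid one position at a time, k times, with per-element inserts/assignments; B flattens once, rotates by k mod (m*n) with a single pair of slices, and reshapes with a list comprehension.
-- outside the precondition, e.g. on shift_2D_grid([[1, 2], [3, 4]], -1): A returns [[], []], B returns [[2, 3], [4, 1]]; on shift_2D_grid([], 1): A raises IndexError, B raises IndexError
import Mathlib
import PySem

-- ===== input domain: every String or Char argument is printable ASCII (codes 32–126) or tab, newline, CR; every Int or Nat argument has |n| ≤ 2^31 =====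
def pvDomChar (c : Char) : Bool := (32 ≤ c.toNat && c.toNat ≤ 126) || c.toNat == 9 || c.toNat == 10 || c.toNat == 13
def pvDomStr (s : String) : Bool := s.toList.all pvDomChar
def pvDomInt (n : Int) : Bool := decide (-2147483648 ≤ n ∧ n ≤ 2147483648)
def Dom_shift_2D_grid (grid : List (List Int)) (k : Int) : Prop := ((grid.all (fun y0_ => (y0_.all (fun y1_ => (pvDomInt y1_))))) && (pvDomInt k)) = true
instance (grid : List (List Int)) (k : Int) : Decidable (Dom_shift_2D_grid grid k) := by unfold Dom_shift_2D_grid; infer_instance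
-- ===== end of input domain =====

-- B replaces A's k-fold one-step shifting loop by a single modular rotation of the
-- flattened grid via slicing (objective: faster).

-- ===== PORT A =====
-- flatten loop of A: for i in grid: for j in i: flat_grid.append(j)
def pvA_flatten (grid : List (List Int)) : List Int :=
  grid.foldl (fun acc i => i.foldl (fun a j => a ++ [j]) acc) []

-- body of A's outer shifting loop (one value of l): the inner 'for i in range(len(flat_grid))'.
-- flat_grid[len(flat_grid)-1], flat_grid[i-1], temp_flat[...] are always in range when the loop
-- body runs (the list is nonempty and 0 ≤ i < len), so getD 0 is exact; likewise new_flat[i] = v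
-- is always in range, so List.set is exact.
def pvA_pass (flat temp : List Int) (l : Int) (nf : List Int) : List Int :=
  (PySem.List.pyRange 0 (flat.length : Int) 1).foldl (fun nf2 i =>
    if i == 0 then
      if l == 0 then PySem.List.insert nf2 0 (flat.getD (flat.length - 1) 0)
      else nf2.set 0 (temp.getD (temp.length - 1) 0)
    else
      if l == 0 then PySem.List.insert nf2 i (flat.getD (i - 1).toNat 0)
      else nf2.set i.toNat (temp.getD (i - 1).toNat 0)) nf

def shift_2D_grid (grid : List (List Int)) (k : Int) : List (List Int) :=
  if k == 0 then grid
  else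
    let flat_grid := pvA_flatten grid
    let m := grid.length
    let n : Int := ((grid.headD []).length : Int)  -- grid[0]; Pre_ excludes grid = [] when k ≠ 0 (IndexError)
    -- for l in range(k): temp_flat = list(new_flat); inner pass
    let new_flat := (PySem.List.pyRange 0 k 1).foldl
      (fun nf l => let temp := nf; pvA_pass flat_grid temp l nf) []
    -- unflatten: for i in range(m): new_grid.append(new_flat[i*n : i*n+n])
    (PySem.List.pyRange 0 (m : Int) 1).foldl
      (fun ng i => ng ++ [PySem.List.slice new_flat (some (i * n)) (some (i * n + n))]) []

-- ===== PORT B =====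
def shift_2D_grid_alt (grid : List (List Int)) (k : Int) : List (List Int) :=
  if k == 0 then grid
  else
    let m := grid.length
    let n : Int := ((grid.headD []).length : Int)  -- grid[0]
    let flat := grid.flatMap (fun row => row)      -- [x for row in grid for x in row]
    let t : Int := (flat.length : Int)
    let flat2 :=
      if t ≠ 0 then
        let s := PySem.Int.mod k t
        PySem.List.slice flat (some (t - s)) none ++ PySem.List.slice flat none (some (t - s))
      else flat
    (PySem.List.pyRange 0 (m : Int) 1).map
      (fun r => PySem.List.slice flat2 (some (r * n)) (some (r * n + n)))

-- ===== PRECONDITION & SPEC =====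
-- Pre_ restricts to the task's natural domain of non-negative shift counts k (for k < 0 A's
-- shifting loop never runs and it returns m empty rows, leftover loop state) and excludes the
-- empty grid with k ≠ 0, on which A raises IndexError at grid[0].
def Pre_shift_2D_grid (grid : List (List Int)) (k : Int) : Prop :=
  0 ≤ k ∧ (k = 0 ∨ grid ≠ [])
instance (grid : List (List Int)) (k : Int) : Decidable (Pre_shift_2D_grid grid k) := by
  unfold Pre_shift_2D_grid; infer_instance

def pvWitness_shift_2D_grid : List (List Int) × Int := ([[1, 2], [3, 4]], 3)

def Spec_shift_2D_grid (grid : List (List Int)) (k : Int) (out : List (List Int)) : Prop := out = shift_2D_grid_alt grid k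
instance (grid : List (List Int)) (k : Int) (out : List (List Int)) : Decidable (Spec_shift_2D_grid grid k out) := by unfold Spec_shift_2D_grid; infer_instance

-- ===== CLAIM (what is proved, stated in full; the proofs are below) =====
def Claim_equal_shift_2D_grid : Prop := ∀ (grid : List (List Int)) (k : Int), Dom_shift_2D_grid grid k → Pre_shift_2D_grid grid k → Spec_shift_2D_grid grid k (shift_2D_grid grid k)

-- ===== LEMMAS AND PROOFS =====

-- Python list.insert at position = current length appends (index in range, exact).
lemma pv_insert_length (xs : List Int) (v : Int) (i : Nat) (h : i = xs.length) :
    PySem.List.insert xs (i : Int) v = xs ++ [v] := by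
  have h1 : (PySem.List.sliceIndices xs.length (some (i : Int)) none 1).1 = (i : Int) := by
    simp only [PySem.List.sliceIndices]
    norm_num
    omega
  simp only [PySem.List.insert, h1]
  simp [h]

-- A's flatten loop is List.flatten.
lemma pvA_flatten_eq (grid : List (List Int)) : pvA_flatten grid = grid.flatten := by
  suffices h : ∀ acc, grid.foldl (fun acc i => i.foldl (fun a j => a ++ [j]) acc) acc
      = acc ++ grid.flatten by
    simpa [pvA_flatten] using h []
  induction grid with
  | nil => simp
  | cons r rs ih =>
    intro acc
    rw [List.foldl_cons, PySem.List.foldl_append_singleton, ih, List.flatten_cons,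
      List.append_assoc]

-- the empty flat list: every pass is the identity
lemma pvA_pass_nil (temp : List Int) (l : Int) (nf : List Int) :
    pvA_pass [] temp l nf = nf := by
  simp [pvA_pass, PySem.List.pyRange]

-- first pass (l = 0): builds last :: init, i.e. a right rotation = rotate (len-1)
lemma pvA_pass_zero (xs temp : List Int) (hx : xs ≠ []) :
    pvA_pass xs temp 0 [] = xs.rotate (xs.length - 1) := by
  have hT : 1 ≤ xs.length := List.length_pos_iff.mpr hx
  have aux : ∀ j, j ≤ xs.length →
      (List.foldl (fun nf2 i =>
        if i == 0 then
          if (0 : Int) == 0 then PySem.List.insert nf2 0 (xs.getD (xs.length - 1) 0)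
          else nf2.set 0 (temp.getD (temp.length - 1) 0)
        else
          if (0 : Int) == 0 then PySem.List.insert nf2 i (xs.getD (i - 1).toNat 0)
          else nf2.set i.toNat (temp.getD (i - 1).toNat 0)) []
        (List.map (fun a : Nat => (a : Int)) (List.range j)))
      = if j = 0 then [] else xs.drop (xs.length - 1) ++ xs.take (j - 1) := by
    intro j hj
    induction j with
    | zero => simp
    | succ j ih =>
      have hj' : j ≤ xs.length := by omega
      rw [List.range_succ, List.map_append, List.foldl_append, ih hj', List.map_singleton,
        List.foldl_cons, List.foldl_nil]
      by_cases hj0 : j = 0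
      · subst hj0
        have hlt : xs.length - 1 < xs.length := by omega
        rw [if_pos rfl]
        simp only [Nat.cast_zero]
        rw [if_pos (by simp : ((0 : Int) == 0) = true),
          if_pos (by simp : ((0 : Int) == 0) = true),
          List.getD_eq_getElem xs 0 hlt]
        have hins := pv_insert_length [] (xs[xs.length - 1]) 0 rfl
        simp only [Nat.cast_zero, List.nil_append] at hins
        rw [hins, if_neg (by omega), List.drop_eq_getElem_cons hlt,
          List.drop_of_length_le (by omega)]
        simp
      · have hne : ¬(((j : Int)) == 0) = true := by simp; omega
        rw [if_neg hj0, if_neg hne, if_pos (by simp : ((0 : Int) == 0) = true)]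
        have hlen : j = (xs.drop (xs.length - 1) ++ xs.take (j - 1)).length := by
          simp; omega
        have h1 : ((j : Int) - 1).toNat = j - 1 := by omega
        rw [h1, pv_insert_length _ _ j hlen]
        have hjl : j - 1 < xs.length := by omega
        rw [List.getD_eq_getElem xs 0 hjl, if_neg (by omega), List.append_assoc,
          ← List.concat_eq_append, List.take_concat_get hjl]
        have h2 : j - 1 + 1 = j := by omega
        rw [h2]
        simp
  unfold pvA_pass
  rw [PySem.List.pyRange_zero_natCast, aux xs.length (le_refl _), if_neg (by omega),
    List.rotate_eq_drop_append_take (by omega)]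

-- later passes (l ≠ 0): overwrites every slot from temp, again a right rotation
lemma pvA_pass_succ (xs temp : List Int) (l : Int) (hl : l ≠ 0)
    (hlen : temp.length = xs.length) (hx : xs ≠ []) :
    pvA_pass xs temp l temp = temp.rotate (temp.length - 1) := by
  have hT : 1 ≤ xs.length := List.length_pos_iff.mpr hx
  have hl' : ¬(l == 0) = true := by simp [hl]
  have aux : ∀ j, j ≤ xs.length →
      (List.foldl (fun nf2 i =>
        if i == 0 then
          if l == 0 then PySem.List.insert nf2 0 (xs.getD (xs.length - 1) 0)
          else nf2.set 0 (temp.getD (temp.length - 1) 0)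
        else
          if l == 0 then PySem.List.insert nf2 i (xs.getD (i - 1).toNat 0)
          else nf2.set i.toNat (temp.getD (i - 1).toNat 0)) temp
        (List.map (fun a : Nat => (a : Int)) (List.range j)))
      = if j = 0 then temp
        else (temp.drop (temp.length - 1) ++ temp.take (j - 1)) ++ temp.drop j := by
    intro j hj
    induction j with
    | zero => simp
    | succ j ih =>
      have hj' : j ≤ xs.length := by omega
      rw [List.range_succ, List.map_append, List.foldl_append, ih hj', List.map_singleton,
        List.foldl_cons, List.foldl_nil]
      by_cases hj0 : j = 0
      · subst hj0
        obtain ⟨a, t, rfl⟩ : ∃ a t', temp = a :: t' := by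
          cases temp with
          | nil => simp at hlen; omega
          | cons a t => exact ⟨a, t, rfl⟩
        rw [if_pos rfl]
        simp only [Nat.cast_zero]
        rw [if_pos (by simp : ((0 : Int) == 0) = true), if_neg hl', if_neg (by omega)]
        have hlt : (a :: t).length - 1 < (a :: t).length := by simp
        rw [List.getD_eq_getElem _ 0 hlt, List.drop_eq_getElem_cons hlt,
          List.drop_of_length_le (by simp)]
        simp
      · have hne : ¬(((j : Int)) == 0) = true := by simp; omega
        rw [if_neg hj0, if_neg hne, if_neg hl']
        have h0 : ((j : Int).toNat) = j := by omega
        have h1 : ((j : Int) - 1).toNat = j - 1 := by omega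
        rw [h0, h1]
        have hprelen : ((temp.drop (temp.length - 1) ++ temp.take (j - 1))).length = j := by
          simp; omega
        rw [List.set_append, if_neg (by omega), hprelen, Nat.sub_self]
        have hjlt : j < temp.length := by omega
        have hj1 : j - 1 < temp.length := by omega
        rw [List.drop_eq_getElem_cons hjlt, List.getD_eq_getElem temp 0 hj1,
          List.set_cons_zero, if_neg (by omega)]
        have htake : temp.take (j + 1 - 1) = temp.take (j - 1) ++ [temp[j - 1]] := by
          rw [← List.concat_eq_append, List.take_concat_get hj1]
          congr 1
          omega
        rw [htake, List.append_assoc, List.append_assoc, List.append_assoc]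
        simp
  unfold pvA_pass
  rw [PySem.List.pyRange_zero_natCast, aux xs.length (le_refl _), if_neg (by omega), ← hlen,
    List.drop_of_length_le (le_refl _), List.append_nil,
    List.rotate_eq_drop_append_take (by omega)]

-- the whole shifting loop: K passes rotate by (T-1)*K
lemma pvA_loop (xs : List Int) (hx : xs ≠ []) : ∀ K, 1 ≤ K →
    (List.foldl (fun nf l => pvA_pass xs nf l nf) []
      (List.map (fun a : Nat => (a : Int)) (List.range K)))
    = xs.rotate ((xs.length - 1) * K) := by
  intro K hK
  induction K with
  | zero => omega
  | succ K ih =>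
    by_cases hK0 : K = 0
    · subst hK0
      simp only [List.range_succ, List.range_zero, List.nil_append, List.map_singleton,
        List.foldl_cons, List.foldl_nil, Nat.cast_zero]
      rw [pvA_pass_zero xs [] hx]
      norm_num
    · have h1 : 1 ≤ K := by omega
      rw [List.range_succ, List.map_append, List.foldl_append, ih h1, List.map_singleton,
        List.foldl_cons, List.foldl_nil]
      have hlen : (xs.rotate ((xs.length - 1) * K)).length = xs.length := by simp
      rw [pvA_pass_succ xs _ (K : Int) (by exact_mod_cast hK0) hlen hx, hlen,
        List.rotate_rotate]
      have : (xs.length - 1) * K + (xs.length - 1) = (xs.length - 1) * (K + 1) := by ring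
      rw [this]

-- arithmetic core: (T-1)*K ≡ T - K % T  [MOD T]
lemma pv_mod_eq (T K : Nat) (hT : 1 ≤ T) :
    ((T - 1) * K) % T = (T - K % T) % T := by
  have hKT : K % T < T := Nat.mod_lt _ (by omega)
  have e1 : (T - 1) * K + K = T * K := by
    rw [Nat.sub_one_mul]
    have : K ≤ T * K := Nat.le_mul_of_pos_left K (by omega)
    omega
  show (T - 1) * K ≡ T - K % T [MOD T]
  apply Nat.ModEq.add_right_cancel' K
  calc (T - 1) * K + K = T * K := e1
    _ ≡ 0 [MOD T] := (Nat.modEq_zero_iff_dvd).mpr ⟨K, rfl⟩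
    _ ≡ T [MOD T] := ((Nat.modEq_zero_iff_dvd).mpr dvd_rfl).symm
    _ = T - K % T + K % T := by omega
    _ ≡ T - K % T + K [MOD T] := Nat.ModEq.add_left _ (Nat.mod_modEq K T)

-- the whole shifting computation of A equals B's single modular slice rotation
lemma pv_core (xs : List Int) (k : Int) (hk0 : 0 ≤ k) (hk : k ≠ 0) :
    List.foldl (fun nf l => pvA_pass xs nf l nf) [] (PySem.List.pyRange 0 k 1)
      = if (xs.length : Int) ≠ 0 then
          PySem.List.slice xs (some ((xs.length : Int) - PySem.Int.mod k (xs.length : Int))) none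
            ++ PySem.List.slice xs none (some ((xs.length : Int) - PySem.Int.mod k (xs.length : Int)))
        else xs := by
  have hK1 : 1 ≤ k.toNat := by omega
  have hkcast : k = ((k.toNat : Nat) : Int) := by omega
  rw [hkcast, PySem.List.pyRange_zero_natCast]
  by_cases hT : xs = []
  · subst hT
    have hfix : ∀ (l : List Int), List.foldl (fun nf l => pvA_pass [] nf l nf) [] l = [] := by
      intro l
      induction l with
      | nil => rfl
      | cons a t iht => rw [List.foldl_cons, pvA_pass_nil]; exact iht
    rw [hfix]
    simp
  · have hTpos : 1 ≤ xs.length := List.length_pos_iff.mpr hT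
    have htne : ((xs.length : Nat) : Int) ≠ 0 := by
      simp only [ne_eq, Nat.cast_eq_zero]; omega
    rw [if_pos htne, pvA_loop xs hT k.toNat hK1, PySem.Int.mod_natCast]
    have hKT : k.toNat % xs.length < xs.length := Nat.mod_lt _ (by omega)
    have hsub : (((xs.length : Nat) : Int) - ((k.toNat % xs.length : Nat) : Int))
        = (((xs.length - k.toNat % xs.length : Nat)) : Int) := by
      push_cast; omega
    rw [hsub, PySem.List.slice_from xs (by positivity),
      PySem.List.slice_to xs (by positivity), Int.toNat_natCast]
    rw [← List.rotate_eq_drop_append_take (by omega),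
      ← List.rotate_mod xs ((xs.length - 1) * k.toNat), pv_mod_eq xs.length k.toNat hTpos,
      List.rotate_mod]

-- ===== VERDICT (by name: the statement is the Claim_ definition above) =====
theorem shift_2D_grid_spec : Claim_equal_shift_2D_grid := by
  intro grid k _hdom hpre
  unfold Spec_shift_2D_grid
  by_cases hk : k = 0
  · simp [shift_2D_grid, shift_2D_grid_alt, hk]
  · obtain ⟨hk0, hg⟩ := hpre
    have hbeq : (k == 0) = false := by simp [hk]
    simp only [shift_2D_grid, shift_2D_grid_alt, hbeq, Bool.false_eq_true, if_false]
    rw [PySem.List.foldl_append_singleton_eq_map, List.nil_append, pvA_flatten_eq]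
    have hflat : grid.flatMap (fun row => row) = grid.flatten := by simp
    rw [hflat, pv_core grid.flatten k hk0 hk]
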